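-- pv_equiv track=rewrite | github.com/shadabchow-ui/product-frontend | src/html to json/amazon_html_to_pdp_json_v15.py | extract_parsejson_payload
-- ===== SOURCE A (Python) =====
-- from typing import Any, Dict, List, Optional, Tuple
--
-- def extract_parsejson_payload(html_text: str, start_from: int = 0) -> Optional[str]:
--   i = html_text.find("jQuery.parseJSON('", start_from)
--   if i == -1:
--     return None
--   j = i + len("jQuery.parseJSON('")
--   out = []
--   esc = False
--   while j < len(html_text):
--     ch = html_text[j]
--     if esc:
--       out.append(ch)
--       esc = False
--     else:
--       if ch == "\\":
--         esc = True
--       elif ch == "'":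
--         return "".join(out)
--       else:
--         out.append(ch)
--     j += 1
--   return None
-- ===== SOURCE B (Python) =====
-- def extract_parsejson_payload(html_text: str, start_from: int = 0):
--     marker = "jQuery.parseJSON('"
--     i = html_text.find(marker, start_from)
--     if i == -1:
--         return None
--     s = html_text[i + len(marker):]
--     pieces = []
--     while True:
--         b = s.find("\\")
--         q = s.find("'")
--         if b == -1 or (q != -1 and q < b):
--             return None if q == -1 else "".join(pieces) + s[:q]
--         if b + 1 >= len(s):
--             return None
--         pieces.append(s[:b])
--         pieces.append(s[b + 1])
--         s = s[b + 2:]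
-- ===== Notes on version B (the rewrite author's own statement) =====
-- stated objective: alternative
-- what changed: Replaces A's char-by-char scan with an escape-state flag by a chunk scanner that locates the next backslash and the next quote with str.find, copies whole slices between them, and consumes escapes two characters at a time.
import Mathlib
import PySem

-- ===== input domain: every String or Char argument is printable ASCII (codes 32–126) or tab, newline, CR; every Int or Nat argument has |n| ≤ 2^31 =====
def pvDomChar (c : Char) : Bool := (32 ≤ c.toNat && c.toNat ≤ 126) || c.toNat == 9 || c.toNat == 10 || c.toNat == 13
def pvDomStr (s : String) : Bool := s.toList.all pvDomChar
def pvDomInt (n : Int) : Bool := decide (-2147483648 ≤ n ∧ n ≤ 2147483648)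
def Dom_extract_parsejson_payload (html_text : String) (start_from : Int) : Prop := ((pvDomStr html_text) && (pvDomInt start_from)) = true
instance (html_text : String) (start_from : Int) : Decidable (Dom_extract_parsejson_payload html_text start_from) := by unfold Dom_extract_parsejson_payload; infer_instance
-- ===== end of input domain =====

-- B replaces A's char-by-char escape-flag scan with a chunk scanner that jumps between
-- occurrences of "\\" and "'" found by str.find and copies slices (objective: alternative).


-- ===== PORT A =====
-- A's while loop over index j with the `esc` flag, as structural recursion over the
-- remaining characters html_text[j:]; `out` is the accumulator list, `esc` the flag.
def pvScanA (s : List Char) (out : List Char) (esc : Bool) : Option (List Char) :=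
  match s with
  | [] => none                                   -- loop falls off the end: return None
  | ch :: rest =>
    if esc then pvScanA rest (out ++ [ch]) false -- out.append(ch); esc = False
    else if ch = '\\' then pvScanA rest out true -- esc = True
    else if ch = '\'' then some out              -- return "".join(out)
    else pvScanA rest (out ++ [ch]) false        -- out.append(ch)

def extract_parsejson_payload (html_text : String) (start_from : Int) : Option String :=
  let i := PySem.Str.findFrom html_text "jQuery.parseJSON('" start_from  -- html_text.find(marker, start_from)
  if i = -1 then none
  else
    -- j = i + len("jQuery.parseJSON('") = i + 18; the loop reads html_text[j:]
    match pvScanA (html_text.toList.drop (i + 18).toNat) [] false with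
    | some out => some (String.ofList out)           -- "".join(out)
    | none => none

-- ===== PORT B =====
-- Source B's while True loop over the remaining slice s: find the next "\\" and the next "'",
-- copy the chunk before whichever comes first; s[b+1] is (s.drop (b+1)).take 1.
def pvScanB (s : List Char) : Option (List Char) :=
  let b := PySem.Chars.find s ['\\']             -- s.find("\\")
  let q := PySem.Chars.find s ['\'']             -- s.find("'")
  if b = -1 ∨ (q ≠ -1 ∧ q < b) then
    if q = -1 then none else some (s.take q.toNat)   -- "".join(pieces) + s[:q] (pieces are the list built so far)
  else if _h : s.length ≤ b.toNat + 1 then none      -- b + 1 >= len(s)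
  else
    match pvScanB (s.drop (b.toNat + 2)) with        -- s = s[b+2:]
    | none => none
    | some rest => some (s.take b.toNat ++ (s.drop (b.toNat + 1)).take 1 ++ rest)  -- pieces += [s[:b], s[b+1]]
termination_by s.length
decreasing_by simp; omega

def extract_parsejson_payload_alt (html_text : String) (start_from : Int) : Option String :=
  let i := PySem.Str.findFrom html_text "jQuery.parseJSON('" start_from  -- html_text.find(marker, start_from)
  if i = -1 then none
  else
    -- s = html_text[i + len(marker):], a slice from a nonnegative in-range start = drop
    (pvScanB (html_text.toList.drop (i + 18).toNat)).map String.ofList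

-- ===== PRECONDITION & SPEC =====
def Spec_extract_parsejson_payload (html_text : String) (start_from : Int) (out : Option String) : Prop := out = extract_parsejson_payload_alt html_text start_from
instance (html_text : String) (start_from : Int) (out : Option String) : Decidable (Spec_extract_parsejson_payload html_text start_from out) := by unfold Spec_extract_parsejson_payload; infer_instance

-- ===== CLAIM (what is proved, stated in full; the proofs are below) =====
def Claim_equal_extract_parsejson_payload : Prop := ∀ (html_text : String) (start_from : Int), Dom_extract_parsejson_payload html_text start_from → Spec_extract_parsejson_payload html_text start_from (extract_parsejson_payload html_text start_from)

-- ===== LEMMAS AND PROOFS =====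

-- [c] is a prefix of l iff l starts with c
theorem pfx_single (c : Char) (l : List Char) : ([c] <+: l) ↔ l.head? = some c := by
  cases l with
  | nil => simp
  | cons a t => simp [List.cons_prefix_cons, eq_comm]

-- where a single-char find succeeds, it points at an in-range occurrence of c
theorem find_single_elem (s : List Char) (c : Char) (h : PySem.Chars.find s [c] ≠ -1) :
    0 ≤ PySem.Chars.find s [c] ∧ ∃ hn : (PySem.Chars.find s [c]).toNat < s.length,
      s[(PySem.Chars.find s [c]).toNat] = c := by
  have hnn : 0 ≤ PySem.Chars.find s [c] := by
    have := PySem.Chars.neg_one_le_find (s := s) (sub := [c])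
    omega
  obtain ⟨hp, -⟩ := PySem.Chars.find_spec (s := s) (sub := [c]) hnn
  have h3 : (PySem.Chars.find s [c]).toNat < s.length := by
    by_contra hge
    rw [List.drop_eq_nil_of_le (by omega)] at hp
    simp at hp
  refine ⟨hnn, h3, ?_⟩
  have := (pfx_single c _).mp hp
  rw [List.head?_drop, List.getElem?_eq_getElem h3, Option.some_inj] at this
  exact this

-- find of the first occurrence after a clean prefix
theorem find_single_pos (pre tail : List Char) (c : Char) (hc : c ∉ pre) :
    PySem.Chars.find (pre ++ c :: tail) [c] = (pre.length : Int) := by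
  have hm : c ∈ pre ++ c :: tail := by simp
  have hne : PySem.Chars.find (pre ++ c :: tail) [c] ≠ -1 := by
    rw [PySem.Chars.find_ne_neg_one_iff, List.singleton_infix_iff]; exact hm
  obtain ⟨hnn, hn, helem⟩ := find_single_elem _ c hne
  obtain ⟨-, hmin⟩ := PySem.Chars.find_spec (s := pre ++ c :: tail) (sub := [c]) hnn
  set n := (PySem.Chars.find (pre ++ c :: tail) [c]).toNat with hndef
  have h1 : ¬ n < pre.length := by
    intro hlt
    have e : (pre ++ c :: tail)[n] = pre[n]'hlt := List.getElem_append_left hlt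
    rw [e] at helem
    exact hc (helem ▸ List.getElem_mem hlt)
  have h2 : ¬ pre.length < n := by
    intro hlt
    refine hmin pre.length hlt ?_
    rw [List.drop_left' rfl, pfx_single]
    rfl
  omega

-- a later occurrence of a different char comes strictly after the clean prefix
theorem find_single_gt (pre tail : List Char) (d c : Char) (hc : c ∉ pre) (hdc : d ≠ c)
    (hne : PySem.Chars.find (pre ++ d :: tail) [c] ≠ -1) :
    (pre.length : Int) < PySem.Chars.find (pre ++ d :: tail) [c] := by
  obtain ⟨hnn, hn, helem⟩ := find_single_elem _ c hne
  set n := (PySem.Chars.find (pre ++ d :: tail) [c]).toNat with hndef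
  have h1 : ¬ n < pre.length := by
    intro hlt
    have e : (pre ++ d :: tail)[n] = pre[n]'hlt := List.getElem_append_left hlt
    rw [e] at helem
    exact hc (helem ▸ List.getElem_mem hlt)
  have h2 : n ≠ pre.length := by
    intro heq
    apply hdc
    have e : (pre ++ d :: tail)[n] = d := by
      rw [List.getElem_append_right (by omega)]
      simp [heq]
    rw [e] at helem; exact helem
  omega

-- an absent char yields -1
theorem find_single_neg (s : List Char) (c : Char) (h : c ∉ s) :
    PySem.Chars.find s [c] = -1 := by
  rw [PySem.Chars.find_eq_neg_one_iff]
  rw [List.singleton_infix_iff]; exact h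

-- A's scan walks straight through a chunk with no backslash and no quote
theorem scanA_prefix (pre : List Char) (h : ∀ c ∈ pre, c ≠ '\\' ∧ c ≠ '\'') :
    ∀ rest out, pvScanA (pre ++ rest) out false = pvScanA rest (out ++ pre) false := by
  induction pre with
  | nil => intro rest out; simp
  | cons a t ih =>
    intro rest out
    obtain ⟨ha1, ha2⟩ := h a (by simp)
    have step : pvScanA (a :: (t ++ rest)) out false = pvScanA (t ++ rest) (out ++ [a]) false := by
      simp [pvScanA, ha1, ha2]
    rw [List.cons_append, step, ih (fun c hc => h c (by simp [hc])) rest (out ++ [a])]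
    simp

-- main loop equivalence
theorem scan_eq : ∀ (n : Nat) (s : List Char), s.length ≤ n → ∀ out,
    pvScanA s out false = (pvScanB s).map (out ++ ·) := by
  intro n
  induction n with
  | zero =>
    intro s hs out
    have hnil : s = [] := List.eq_nil_of_length_eq_zero (by omega)
    subst hnil
    rw [pvScanB]
    simp [pvScanA, find_single_neg]
  | succ n ih =>
    intro s hs out
    have hdecomp : s.takeWhile (fun c => !(c = '\\' || c = '\'')) ++
        s.dropWhile (fun c => !(c = '\\' || c = '\'')) = s := List.takeWhile_append_dropWhile
    set pre := s.takeWhile (fun c => !(c = '\\' || c = '\'')) with hpre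
    set rest := s.dropWhile (fun c => !(c = '\\' || c = '\'')) with hrest
    have hclean : ∀ c ∈ pre, c ≠ '\\' ∧ c ≠ '\'' := by
      intro c hc
      have := List.mem_takeWhile_imp hc
      simpa using this
    have hbs : '\\' ∉ pre := fun h => (hclean _ h).1 rfl
    have hqs : '\'' ∉ pre := fun h => (hclean _ h).2 rfl
    cases hr : rest with
    | nil =>
      have hs' : s = pre := by rw [← hdecomp, hr, List.append_nil]
      have hA : pvScanA s out false = none := by
        have h0 := scanA_prefix pre hclean [] out
        rw [List.append_nil] at h0
        rw [hs', h0]; rfl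
      have hb : PySem.Chars.find s ['\\'] = -1 :=
        find_single_neg _ _ (by rw [hs']; exact hbs)
      have hq : PySem.Chars.find s ['\''] = -1 :=
        find_single_neg _ _ (by rw [hs']; exact hqs)
      rw [hA, pvScanB]
      simp [hb, hq]
    | cons d tail =>
      have hs' : s = pre ++ d :: tail := by rw [← hdecomp, hr]
      have hdspec : d = '\\' ∨ d = '\'' := by
        have hne : s.dropWhile (fun c => !(c = '\\' || c = '\'')) ≠ [] := by
          rw [← hrest, hr]; simp
        have h1 := List.head_dropWhile_not (fun c => !(c = '\\' || c = '\'')) (l := s) hne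
        have e : s.dropWhile (fun c => !(c = '\\' || c = '\'')) = d :: tail := by
          rw [← hrest, hr]
        have h2 : (s.dropWhile (fun c => !(c = '\\' || c = '\''))).head hne = d := by
          simp only [e, List.head_cons]
        rw [h2] at h1
        simp at h1
        tauto
      rcases hdspec with hd | hd
      · -- d = '\\' : backslash first
        subst hd
        have hb : PySem.Chars.find s ['\\'] = (pre.length : Int) := by
          rw [hs']; exact find_single_pos pre tail _ hbs
        have hqcond : ¬ (PySem.Chars.find s ['\''] ≠ -1 ∧ PySem.Chars.find s ['\''] < PySem.Chars.find s ['\\']) := by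
          rintro ⟨hq1, hq2⟩
          rw [hs'] at hq1
          have hgt := find_single_gt pre tail '\\' '\'' hqs (by decide) hq1
          rw [← hs'] at hgt
          rw [hb] at hq2
          omega
        have hbne : ¬ PySem.Chars.find s ['\\'] = -1 := by rw [hb]; omega
        have hbtoNat : (PySem.Chars.find s ['\\']).toNat = pre.length := by
          rw [hb]; exact Int.toNat_natCast _
        have hlen : s.length = pre.length + 1 + tail.length := by rw [hs']; simp; omega
        cases tail with
        | nil =>
          -- trailing backslash: both sides give none
          have hA : pvScanA s out false = none := by
            rw [hs', scanA_prefix pre hclean]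
            simp [pvScanA]
          rw [hA, pvScanB]
          rw [if_neg (fun h => h.elim hbne hqcond)]
          rw [dif_pos (by rw [hbtoNat, hlen]; simp)]
          rfl
        | cons c tail2 =>
          have hA : pvScanA s out false = pvScanA tail2 (out ++ pre ++ [c]) false := by
            rw [hs', scanA_prefix pre hclean]
            simp [pvScanA]
          have hdrop2 : s.drop (pre.length + 2) = tail2 := by
            rw [hs', show pre ++ '\\' :: c :: tail2 = (pre ++ ['\\', c]) ++ tail2 by simp]
            exact List.drop_left' (by simp)
          have hdrop1 : s.drop (pre.length + 1) = c :: tail2 := by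
            rw [hs', show pre ++ '\\' :: c :: tail2 = (pre ++ ['\\']) ++ c :: tail2 by simp]
            exact List.drop_left' (by simp)
          have htake : s.take pre.length = pre := by
            rw [hs']; exact List.take_left
          have hih := ih tail2
            (by rw [hlen] at hs; simp only [List.length_cons] at hs; omega) (out ++ pre ++ [c])
          rw [hA, hih]
          conv_rhs => rw [pvScanB]
          rw [if_neg (fun h => h.elim hbne hqcond)]
          rw [dif_neg (by rw [hbtoNat, hlen]; simp only [List.length_cons]; omega)]
          rw [hbtoNat, hdrop2, hdrop1, htake]
          cases pvScanB tail2 <;> simp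
      · -- d = '\'' : quote first, return
        subst hd
        have hq : PySem.Chars.find s ['\''] = (pre.length : Int) := by
          rw [hs']; exact find_single_pos pre tail _ hqs
        have hcond : PySem.Chars.find s ['\\'] = -1 ∨
            (PySem.Chars.find s ['\''] ≠ -1 ∧ PySem.Chars.find s ['\''] < PySem.Chars.find s ['\\']) := by
          by_cases hb : PySem.Chars.find s ['\\'] = -1
          · exact Or.inl hb
          · refine Or.inr ⟨by rw [hq]; omega, ?_⟩
            have := find_single_gt pre tail '\'' '\\' hbs (by decide) (by rw [← hs']; exact hb)
            rw [← hs'] at this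
            rw [hq]; omega
        have hA : pvScanA s out false = some (out ++ pre) := by
          rw [hs', scanA_prefix pre hclean]
          simp [pvScanA]
        have htake : s.take (PySem.Chars.find s ['\'']).toNat = pre := by
          rw [hq, Int.toNat_natCast, hs']; exact List.take_left
        rw [hA, pvScanB]
        rw [if_pos hcond, if_neg (by rw [hq]; omega), htake]
        rfl

-- ===== VERDICT (by name: the statement is the Claim_ definition above) =====
theorem extract_parsejson_payload_spec : Claim_equal_extract_parsejson_payload := by
  intro html_text start_from _
  unfold Spec_extract_parsejson_payload extract_parsejson_payload extract_parsejson_payload_alt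
  set i := PySem.Str.findFrom html_text "jQuery.parseJSON('" start_from
  by_cases hi : i = -1
  · simp [hi]
  · simp only [if_neg hi]
    have := scan_eq (html_text.toList.drop (i + 18).toNat).length _ le_rfl []
    rw [this]
    cases pvScanB (html_text.toList.drop (i + 18).toNat) <;> simp
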